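-- pv_equiv track=rewrite | github.com/AriPLK/Python | Module2/module_2_puzzle.py | answer
-- ===== SOURCE A (Python) =====
-- def answer(number):
--     if number < 3 or number > 20:
--         return "Необходимо ввести число в диапазоне от 3 до 20"
--     result = ""
--     i = 1
--     while i < 20:
--         j = i + 1
--         while j <= 20:
--             if number % (i + j) == 0:
--                 result += f"{i}{j}"
--             j += 1
--         i += 1
--     return result
-- ===== SOURCE B (Python) =====
-- def answer(number):
--     if number < 3 or number > 20:
--         return "Необходимо ввести число в диапазоне от 3 до 20"
--     pairs = []
--     for d in range(3, 21):
--         if number % d == 0: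
--             for i in range(1, (d - 1) // 2 + 1):
--                 pairs.append((i, d - i))
--     pairs.sort()
--     return "".join(f"{i}{j}" for i, j in pairs)
-- ===== Notes on version B (the rewrite author's own statement) =====
-- stated objective: alternative
-- what changed: B enumerates the divisors d of number in 3..20 once, generates for each the pairs (i,j) with i<j and i+j=d directly, then sorts the collected pairs and joins them, instead of A's nested 20x20 scan testing number % (i+j) for every pair.
import Mathlib
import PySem

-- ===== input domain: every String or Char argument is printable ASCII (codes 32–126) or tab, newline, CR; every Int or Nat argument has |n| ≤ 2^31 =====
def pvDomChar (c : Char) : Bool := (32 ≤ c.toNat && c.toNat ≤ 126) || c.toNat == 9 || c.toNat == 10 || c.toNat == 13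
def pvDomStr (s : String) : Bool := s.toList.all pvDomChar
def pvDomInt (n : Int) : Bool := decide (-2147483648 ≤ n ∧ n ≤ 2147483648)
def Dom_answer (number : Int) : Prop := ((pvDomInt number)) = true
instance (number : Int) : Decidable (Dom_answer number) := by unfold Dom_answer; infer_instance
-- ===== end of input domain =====

-- ===== PORT A =====
-- B concatenates pairs grouped by divisor d = i+j and sorts, instead of A's nested i/j scan with a modulo test.
-- A-side: the two Python while-loops, transliterated as fuel recursions over the same counters.
def answerInner (number i : Int) : Int → Nat → String → String
  | _, 0, acc => acc
  | j, fuel + 1, acc =>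
    if j ≤ 20 then
      answerInner number i (j + 1) fuel
        (if PySem.Int.mod number (i + j) = 0 then acc ++ PySem.Int.toStr i ++ PySem.Int.toStr j else acc)
    else acc

def answerOuter (number : Int) : Int → Nat → String → String
  | _, 0, acc => acc
  | i, fuel + 1, acc =>
    if i < 20 then answerOuter number (i + 1) fuel (answerInner number i (i + 1) 21 acc)
    else acc

def answer (number : Int) : String :=
  if number < 3 ∨ number > 20 then "Необходимо ввести число в диапазоне от 3 до 20"
  else answerOuter number 1 20 ""

-- ===== PORT B =====
def answer_alt (number : Int) : String :=
  if number < 3 ∨ number > 20 then "Необходимо ввести число в диапазоне от 3 до 20"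
  else
    let pairs := (PySem.List.pyRange 3 21 1).foldl (fun pairs d =>
      if PySem.Int.mod number d = 0 then
        pairs ++ (PySem.List.pyRange 1 (PySem.Int.floordiv (d - 1) 2 + 1) 1).map (fun i => (i, d - i))
      else pairs) []
    PySem.Str.join "" ((PySem.List.sorted2 pairs (fun p => p.1) (fun p => p.2)).map
      (fun p => PySem.Int.toStr p.1 ++ PySem.Int.toStr p.2))

-- ===== PRECONDITION & SPEC =====
def Spec_answer (number : Int) (out : String) : Prop := out = answer_alt number
instance (number : Int) (out : String) : Decidable (Spec_answer number out) := by unfold Spec_answer; infer_instance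

-- ===== CLAIM (what is proved, stated in full; the proofs are below) =====
def Claim_equal_answer : Prop := ∀ (number : Int), Dom_answer number → Spec_answer number (answer number)

-- ===== LEMMAS AND PROOFS =====
set_option maxRecDepth 4000 in
theorem answer_eq_alt_of_in_range (number : Int) (h3 : 3 ≤ number) (h20 : number ≤ 20) :
    answer number = answer_alt number := by
  interval_cases number <;> decide

-- ===== VERDICT (by name: the statement is the Claim_ definition above) =====
theorem answer_spec : Claim_equal_answer := by
  intro number _
  unfold Spec_answer
  by_cases h : number < 3 ∨ number > 20
  · simp [answer, answer_alt, h]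
  · push Not at h
    exact answer_eq_alt_of_in_range number h.1 h.2
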